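-- pv_equiv track=rewrite | github.com/rkdalsdn94/algoalgo | programmers/Lv2/디펜스_게임.py | solution
-- ===== SOURCE A (Python) =====
-- from heapq import heappop, heappush
--
-- def solution(n, k, enemy):
--     rounds_completed = 0  # 완료한 라운드 수
--     total_enemies = 0     # 지금까지 등장한 총 적의 수
--     max_heap = []
--
--     for e in enemy:
--         # 현재 라운드의 적 수를 최대 힙에 추가 (음수로 저장하여 최대 힙 구현)
--         heappush(max_heap, -e)
--         total_enemies += e
--
--         # 적의 수가 보유한 병사 수보다 많다면
--         if total_enemies > n:
--             # 무적권이 남아있지 않으면 게임 종료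
--             if k == 0:
--                 break
--
--             # 무적권 사용: 가장 많은 적이 있는 라운드를 처리
--             # (최대 힙에서 가장 큰 값을 제거하고 총 적의 수에서 뺌)
--             total_enemies += heappop(max_heap)  # 음수 값을 더하면 빼는 효과
--             k -= 1  # 무적권 사용 횟수 감소
--
--         rounds_completed += 1
--
--     return rounds_completed
-- ===== SOURCE B (Python) =====
-- from heapq import heappush, heappop
--
-- def solution(n, k, enemy):
--     # Keep the k largest rounds seen so far in a min-heap `cover` (the rounds an
--     # invincibility card will cover); every round evicted from it is paid for with
--     # soldiers.  Return the index of the first round whose payment exceeds n.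
--     cover = []   # min-heap of the (at most k) rounds currently covered
--     used = 0     # soldiers spent on all other rounds so far
--     for i, e in enumerate(enemy):
--         heappush(cover, e)
--         if len(cover) > k:
--             used += heappop(cover)   # evict the smallest covered round and pay it
--             if used > n:
--                 return i
--     return len(enemy)
-- ===== Notes on version B (the rewrite author's own statement) =====
-- stated objective: alternative
-- what changed: A keeps every round in one growing max-heap and repairs the running total whenever it exceeds n; B keeps only the k largest rounds seen so far in a size-bounded min-heap and accumulates the soldiers spent on all evicted rounds, returning at the first round where that spend exceeds n.
-- outside the precondition, e.g. on solution(5, -1, [10]): A returns 1, B returns 0; on solution(1, 1, [2, -2, 10, -6, -9, -5]): A returns 2, B returns 6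
import Mathlib
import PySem

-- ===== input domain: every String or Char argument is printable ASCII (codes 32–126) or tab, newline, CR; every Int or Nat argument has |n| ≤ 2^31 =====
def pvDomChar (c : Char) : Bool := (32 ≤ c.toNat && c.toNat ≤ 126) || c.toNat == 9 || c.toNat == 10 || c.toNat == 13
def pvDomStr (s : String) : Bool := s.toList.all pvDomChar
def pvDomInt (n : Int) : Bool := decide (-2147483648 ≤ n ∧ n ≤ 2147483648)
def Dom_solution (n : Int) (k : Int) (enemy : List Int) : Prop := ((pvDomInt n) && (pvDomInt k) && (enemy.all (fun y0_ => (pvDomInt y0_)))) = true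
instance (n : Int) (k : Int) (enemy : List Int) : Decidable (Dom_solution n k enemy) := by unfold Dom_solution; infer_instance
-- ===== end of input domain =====

-- B replaces A's single growing max-heap (running total repaired on overflow) by a
-- plain list of the k largest rounds seen so far, evicting its minimum and paying
-- for every evicted round; same return value on the natural domain (k ≥ 0, enemies ≥ 0).

-- ===== PORT A =====
-- Python's heapq is a binary min-heap kept in a list; observably it is "insert, and
-- pop the minimum".  The port models that contract exactly by an ascending sorted
-- list: insertion in order, pop = head = minimum.  A stores NEGATED values (-e), so
-- the popped head is minus the largest enemy count, exactly as in the Python.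
def insAsc (e : Int) : List Int → List Int
  | [] => [e]
  | x :: xs => if e ≤ x then e :: x :: xs else x :: insAsc e xs

def aGo (n : Int) : Int → Int → Int → List Int → List Int → Int
  | _k, rounds, _total, _heap, [] => rounds
  | k, rounds, total, heap, e :: rest =>
    let heap' := insAsc (-e) heap          -- heappush(max_heap, -e)
    let total' := total + e                -- total_enemies += e
    if n < total' then                     -- if total_enemies > n
      if k = 0 then rounds                 -- break
      else
        match heap' with
        | [] => rounds                     -- unreachable: the heap was just pushed to
        | m :: hs => aGo n (k - 1) (rounds + 1) (total' + m) hs rest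
                                           -- total_enemies += heappop(max_heap); k -= 1
    else aGo n k (rounds + 1) total' heap' rest

def solution (n : Int) (k : Int) (enemy : List Int) : Int := aGo n k 0 0 [] enemy

-- ===== PORT B =====
-- B's heapq min-heap `cover`, modelled by its observable contract: heappush adds the
-- element (cover ++ [e]), heappop returns the minimum (min(cover ++ [e]) = fold of min
-- over cover started at e) and removes one occurrence of it (List.erase).
def bGo (n k : Int) : Int → Int → List Int → List Int → Int
  | i, _used, _cover, [] => i
  | i, used, cover, e :: rest =>
    let cover' := cover ++ [e]             -- cover.append(e)
    if k < (cover'.length : Int) then      -- if len(cover) > k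
      let m := cover.foldl min e           -- heappop returns min(cover)
      let used' := used + m                -- used += heappop(cover)
      if n < used' then i                  -- if used > n: return i
      else bGo n k (i + 1) used' (cover'.erase m) rest
    else bGo n k (i + 1) used cover' rest

def solution_alt (n : Int) (k : Int) (enemy : List Int) : Int := bGo n k 0 0 [] enemy

-- ===== PRECONDITION & SPEC =====
-- Pre_ covers the problem's natural domain (a count k ≥ 0 of invincibilities and
-- per-round enemy counts ≥ 0; the problem's constraints have n, k, enemy[i] ≥ 1) plus
-- every input with k ≥ len(enemy) or with n ≥ the total positive enemy count, where
-- both programs trivially survive all rounds.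
-- A still returns outside Pre_, but its values there (for k < 0 it can never break,
-- and for negative enemy counts the greedy's heap order is meaningless) are accidents
-- of the implementation that B does not reproduce.
def Pre_solution (n : Int) (k : Int) (enemy : List Int) : Prop :=
  (0 ≤ k ∧ ∀ e ∈ enemy, 0 ≤ e) ∨ (enemy.length : Int) ≤ k ∨ (0 ≤ n ∧ ∀ e ∈ enemy, e ≤ 0)
instance (n : Int) (k : Int) (enemy : List Int) : Decidable (Pre_solution n k enemy) := by
  unfold Pre_solution; infer_instance

def pvWitness_solution : Int × Int × List Int := (7, 1, [4, 2, 4, 8, 3])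

def Spec_solution (n : Int) (k : Int) (enemy : List Int) (out : Int) : Prop := out = solution_alt n k enemy
instance (n : Int) (k : Int) (enemy : List Int) (out : Int) : Decidable (Spec_solution n k enemy out) := by unfold Spec_solution; infer_instance

-- ===== CLAIM (what is proved, stated in full; the proofs are below) =====
def Claim_equal_solution : Prop := ∀ (n : Int) (k : Int) (enemy : List Int), Dom_solution n k enemy → Pre_solution n k enemy → Spec_solution n k enemy (solution n k enemy)

-- ===== LEMMAS AND PROOFS =====

theorem insAsc_perm (e : Int) (l : List Int) : (insAsc e l).Perm (e :: l) := by
  induction l with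
  | nil => simp [insAsc]
  | cons x xs ih =>
    simp only [insAsc]
    split
    · exact List.Perm.refl _
    · exact (ih.cons x).trans (List.Perm.swap e x xs)

theorem insAsc_coe (e : Int) (l : List Int) :
    ((insAsc e l : List Int) : Multiset Int) = e ::ₘ (l : Multiset Int) :=
  Multiset.coe_eq_coe.mpr (insAsc_perm e l)

theorem insAsc_pairwise {l : List Int} (h : List.Pairwise (· ≤ ·) l) (e : Int) :
    List.Pairwise (· ≤ ·) (insAsc e l) := by
  induction l with
  | nil => simp [insAsc]
  | cons x xs ih =>
    rw [List.pairwise_cons] at h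
    simp only [insAsc]
    split
    · rename_i he
      rw [List.pairwise_cons]
      refine ⟨?_, List.pairwise_cons.mpr h⟩
      intro b hb
      rcases List.mem_cons.mp hb with hb | hb
      · omega
      · exact le_trans he (h.1 b hb)
    · rename_i he
      rw [List.pairwise_cons]
      refine ⟨?_, ih h.2⟩
      intro b hb
      rcases List.mem_cons.mp ((insAsc_perm e xs).mem_iff.mp hb) with hb | hb
      · subst hb; omega
      · exact h.1 b hb

theorem int_le_antisymm {l₁ l₂ : List Int} :
    ∀ a b : Int, a ∈ l₁ → b ∈ l₂ → a ≤ b → b ≤ a → a = b := by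
  intro a b _ _ h1 h2; omega

theorem int_ge_antisymm {l₁ l₂ : List Int} :
    ∀ a b : Int, a ∈ l₁ → b ∈ l₂ → a ≥ b → b ≥ a → a = b := by
  intro a b _ _ h1 h2; omega

theorem asc_eq' {l₁ l₂ : List Int} (p : (l₁ : Multiset Int) = l₂)
    (h₁ : List.Pairwise (· ≤ ·) l₁) (h₂ : List.Pairwise (· ≤ ·) l₂) : l₁ = l₂ :=
  List.Perm.eq_of_pairwise int_le_antisymm h₁ h₂ (Multiset.coe_eq_coe.mp p)

theorem desc_eq' {l₁ l₂ : List Int} (p : (l₁ : Multiset Int) = l₂)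
    (h₁ : List.Pairwise (· ≥ ·) l₁) (h₂ : List.Pairwise (· ≥ ·) l₂) : l₁ = l₂ :=
  List.Perm.eq_of_pairwise int_ge_antisymm h₁ h₂ (Multiset.coe_eq_coe.mp p)

theorem insAsc_length (e : Int) (l : List Int) : (insAsc e l).length = l.length + 1 :=
  (insAsc_perm e l).length_eq

theorem insAsc_mem {x e : Int} {l : List Int} (h : x ∈ insAsc e l) : x = e ∨ x ∈ l :=
  List.mem_cons.mp ((insAsc_perm e l).mem_iff.mp h)

theorem insAsc_cons_of_le {e x : Int} (xs : List Int) (h : e ≤ x) :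
    insAsc e (x :: xs) = e :: x :: xs := by
  simp [insAsc, h]

theorem insAsc_cons_of_gt {e x : Int} (xs : List Int) (h : x < e) :
    insAsc e (x :: xs) = x :: insAsc e xs := by
  simp only [insAsc, if_neg (by omega : ¬ e ≤ x)]

theorem sum_nonneg' {l : List Int} (h : ∀ x ∈ l, 0 ≤ x) : 0 ≤ l.sum := by
  induction l with
  | nil => simp
  | cons x xs ih =>
    simp only [List.sum_cons]
    have h1 := h x (by simp)
    have h2 := ih (fun y hy => h y (by simp [hy]))
    omega

-- ---- the sorted-list REFERENCE form of B's loop (proof-internal only) ----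
-- bGoRef keeps B's cover list in ascending order; the bridge lemma below shows the
-- unordered port bGo computes the same value, and the big invariant proof `main`
-- relates bGoRef to A's loop.
def bGoRef (n k : Int) : Int → Int → List Int → List Int → Int
  | i, _used, _heap, [] => i
  | i, used, heap, e :: rest =>
    let heap' := insAsc e heap
    if k < (heap'.length : Int) then
      match heap' with
      | [] => i
      | m :: hs =>
        let used' := used + m
        if n < used' then i
        else bGoRef n k (i + 1) used' hs rest
    else bGoRef n k (i + 1) used heap' rest

-- ---- facts about the fold that computes min(cover ++ [e]) ----
theorem foldl_min_le_init (l : List Int) : ∀ a : Int, l.foldl min a ≤ a := by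
  induction l with
  | nil => intro a; simp
  | cons x xs ih =>
    intro a
    have h := ih (min a x)
    simp only [List.foldl_cons]
    have : min a x ≤ a := min_le_left a x
    omega

theorem foldl_min_le_mem (l : List Int) : ∀ a : Int, ∀ x ∈ l, l.foldl min a ≤ x := by
  induction l with
  | nil => intro a x hx; simp at hx
  | cons y ys ih =>
    intro a x hx
    simp only [List.foldl_cons]
    rcases List.mem_cons.mp hx with rfl | hx
    · have h := foldl_min_le_init ys (min a x)
      have : min a x ≤ x := min_le_right a x
      omega
    · exact ih (min a y) x hx

theorem foldl_min_mem (l : List Int) : ∀ a : Int, l.foldl min a = a ∨ l.foldl min a ∈ l := by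
  induction l with
  | nil => intro a; simp
  | cons x xs ih =>
    intro a
    simp only [List.foldl_cons]
    rcases ih (min a x) with h | h
    · rcases le_total a x with hax | hax
      · left; rw [h, min_eq_left hax]
      · right; rw [h, min_eq_right hax]; simp
    · right; simp [h]

-- ---- bridge: the unordered-list port equals the sorted reference loop ----
theorem bGo_eq_ref (n k : Int) :
    ∀ (rest : List Int) (i used : Int) (cover heap : List Int),
      cover.Perm heap → List.Pairwise (· ≤ ·) heap →
      bGo n k i used cover rest = bGoRef n k i used heap rest := by
  intro rest
  induction rest with
  | nil => intro i used cover heap _ _; rfl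
  | cons e rest ih =>
    intro i used cover heap hperm hsort
    have hperm' : (cover ++ [e]).Perm (insAsc e heap) := by
      refine List.Perm.trans ?_ (insAsc_perm e heap).symm
      exact (List.perm_append_singleton e cover).trans (hperm.cons e)
    have hlen : (cover ++ [e]).length = (insAsc e heap).length := hperm'.length_eq
    show (if k < ((cover ++ [e]).length : Int) then _ else _) = bGoRef n k i used heap (e :: rest)
    show _ = (if k < ((insAsc e heap).length : Int) then _ else _)
    rw [hlen]
    by_cases hfull : k < ((insAsc e heap).length : Int)
    · rw [if_pos hfull, if_pos hfull]
      rcases hd : insAsc e heap with _ | ⟨m, hs⟩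
      · have := insAsc_length e heap; rw [hd] at this; simp at this
      have hsort' : List.Pairwise (· ≤ ·) (m :: hs) := hd ▸ insAsc_pairwise hsort e
      obtain ⟨hmle, hssort⟩ := List.pairwise_cons.mp hsort'
      have hpc : (cover ++ [e]).Perm (m :: hs) := hd ▸ hperm'
      -- the fold computes exactly m, the head of the sorted heap
      have hmin : cover.foldl min e = m := by
        have hmem : cover.foldl min e ∈ m :: hs := by
          apply hpc.mem_iff.mp
          rcases foldl_min_mem cover e with h | h
          · rw [h]; simp
          · exact List.mem_append_left _ h
        have h1 : m ≤ cover.foldl min e := by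
          rcases List.mem_cons.mp hmem with h | h
          · omega
          · exact hmle _ h
        have hm2 : m ∈ cover ++ [e] := hpc.mem_iff.mpr (by simp)
        have h2 : cover.foldl min e ≤ m := by
          rcases List.mem_append.mp hm2 with h | h
          · exact foldl_min_le_mem cover e m h
          · simp at h; rw [h]; exact foldl_min_le_init cover e
        omega
      rw [hmin]
      by_cases hov : n < used + m
      · simp only [if_pos hov]
      · simp only [if_neg hov]
        apply ih
        · have := hpc.erase m
          simpa using this
        · exact hssort
    · rw [if_neg hfull, if_neg hfull]
      exact ih (i + 1) used (cover ++ [e]) (insAsc e heap) hperm' (insAsc_pairwise hsort e)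

-- descending insertion (the positive-value view of A's negated heap)
def insDesc (e : Int) : List Int → List Int
  | [] => [e]
  | x :: xs => if x ≤ e then e :: x :: xs else x :: insDesc e xs

theorem insDesc_perm (e : Int) (l : List Int) : (insDesc e l).Perm (e :: l) := by
  induction l with
  | nil => simp [insDesc]
  | cons x xs ih =>
    simp only [insDesc]
    split
    · exact List.Perm.refl _
    · exact (ih.cons x).trans (List.Perm.swap e x xs)

theorem insDesc_coe (e : Int) (l : List Int) :
    ((insDesc e l : List Int) : Multiset Int) = e ::ₘ (l : Multiset Int) :=
  Multiset.coe_eq_coe.mpr (insDesc_perm e l)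

theorem insDesc_pairwise {l : List Int} (h : List.Pairwise (· ≥ ·) l) (e : Int) :
    List.Pairwise (· ≥ ·) (insDesc e l) := by
  induction l with
  | nil => simp [insDesc]
  | cons x xs ih =>
    rw [List.pairwise_cons] at h
    simp only [insDesc]
    split
    · rename_i he
      rw [List.pairwise_cons]
      refine ⟨?_, List.pairwise_cons.mpr h⟩
      intro b hb
      rcases List.mem_cons.mp hb with hb | hb
      · omega
      · exact le_trans (h.1 b hb) he
    · rename_i he
      rw [List.pairwise_cons]
      refine ⟨?_, ih h.2⟩
      intro b hb
      rcases List.mem_cons.mp ((insDesc_perm e xs).mem_iff.mp hb) with hb | hb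
      · subst hb; omega
      · exact h.1 b hb

theorem insDesc_sum (e : Int) (l : List Int) : (insDesc e l).sum = e + l.sum :=
  (insDesc_perm e l).sum_eq

theorem insDesc_mem {x e : Int} {l : List Int} (h : x ∈ insDesc e l) : x = e ∨ x ∈ l :=
  List.mem_cons.mp ((insDesc_perm e l).mem_iff.mp h)

theorem insDesc_cons_of_le {e x : Int} (xs : List Int) (h : x ≤ e) :
    insDesc e (x :: xs) = e :: x :: xs := by
  simp [insDesc, h]

theorem insDesc_cons_of_gt {e x : Int} (xs : List Int) (h : e < x) :
    insDesc e (x :: xs) = x :: insDesc e xs := by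
  simp only [insDesc, if_neg (by omega : ¬ x ≤ e)]

-- bridge between A's negated min-heap and the positive descending view
def negMap (l : List Int) : List Int := l.map (fun x => -x)

theorem negMap_insDesc (e : Int) (l : List Int) :
    insAsc (-e) (negMap l) = negMap (insDesc e l) := by
  induction l with
  | nil => simp [insAsc, insDesc, negMap]
  | cons x xs ih =>
    simp only [negMap, List.map_cons, insAsc, insDesc]
    by_cases h : x ≤ e
    · rw [if_pos (by omega), if_pos h]; simp [negMap]
    · rw [if_neg (by omega), if_neg h]
      simp only [List.map_cons]
      have : insAsc (-e) (List.map (fun x => -x) xs) = List.map (fun x => -x) (insDesc e xs) := ih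
      rw [this]

theorem negMap_cons (x : Int) (l : List Int) : negMap (x :: l) = -x :: negMap l := rfl

theorem insDesc_eq_cons {e : Int} {l : List Int} (h : ∀ x ∈ l, x ≤ e) :
    insDesc e l = e :: l := by
  cases l with
  | nil => rfl
  | cons x xs => exact insDesc_cons_of_le xs (h x (by simp))

theorem pw_rev {l : List Int} : List.Pairwise (· ≥ ·) l ↔ List.Pairwise (· ≤ ·) l.reverse := by
  rw [List.pairwise_reverse]

-- one-step unfoldings of the two loops
theorem aGo_cons (n k rounds total : Int) (heap : List Int) (e : Int) (rest : List Int) :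
    aGo n k rounds total heap (e :: rest) =
      if n < total + e then
        if k = 0 then rounds
        else
          match insAsc (-e) heap with
          | [] => rounds
          | m :: hs => aGo n (k - 1) (rounds + 1) (total + e + m) hs rest
      else aGo n k (rounds + 1) (total + e) (insAsc (-e) heap) rest := rfl

theorem bGoRef_cons (n k i used : Int) (heap : List Int) (e : Int) (rest : List Int) :
    bGoRef n k i used heap (e :: rest) =
      if k < ((insAsc e heap).length : Int) then
        match insAsc e heap with
        | [] => i
        | m :: hs => if n < used + m then i else bGoRef n k (i + 1) (used + m) hs rest
      else bGoRef n k (i + 1) used (insAsc e heap) rest := rfl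

-- The coupling invariant between A's state (positive, descending view of its heap)
-- and B's reference state.  `hi` is the part of B's heap still present in A's heap,
-- `removed` the rounds A has already cancelled with invincibility cards (always the
-- largest rounds seen so far), `lo` the rest of A's heap.
def INV (n k0 kA total used : Int) (heapA heapB : List Int) : Prop :=
  ∃ hi lo removed : List Int,
    heapA = hi ++ lo ∧
    heapB = hi.reverse ++ removed ∧
    List.Pairwise (· ≥ ·) heapA ∧
    List.Pairwise (· ≤ ·) heapB ∧
    (∀ x ∈ heapA, 0 ≤ x) ∧
    (∀ r ∈ removed, 0 ≤ r) ∧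
    (∀ x ∈ heapA, ∀ r ∈ removed, x ≤ r) ∧
    used = total - hi.sum ∧
    total ≤ n ∧
    (∀ r ∈ removed, n - r < total) ∧
    kA = k0 - removed.length ∧
    0 ≤ kA ∧
    (lo = [] ∨ (heapB.length : Int) = k0) ∧
    (heapB.length : Int) ≤ k0

theorem main (n k0 : Int) :
    ∀ (rest : List Int), (∀ e ∈ rest, 0 ≤ e) →
    ∀ kA total used rounds heapA heapB,
      INV n k0 kA total used heapA heapB →
      aGo n kA rounds total (negMap heapA) rest = bGoRef n k0 rounds used heapB rest := by
  intro rest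
  induction rest with
  | nil => intro _ kA total used rounds heapA heapB _; rfl
  | cons e rest ih =>
    intro hnn kA total used rounds heapA heapB inv
    have he : 0 ≤ e := hnn e (by simp)
    have hnn' : ∀ x ∈ rest, 0 ≤ x := fun x hx => hnn x (by simp [hx])
    obtain ⟨hi, lo, removed, hA, hB, sA, sB, nnA, nnR, hbnd, hused, htot, hiv, hkA, hkA0, hdisj, hlen⟩ := inv
    have hlenB : (insAsc e heapB).length = heapB.length + 1 := insAsc_length e heapB
    have hBlenZ : (heapB.length : Int) = (hi.length : Int) + (removed.length : Int) := by
      rw [hB]; simp [List.length_append]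
    have nnHi : ∀ x ∈ hi, 0 ≤ x := fun x hx => nnA x (by rw [hA]; exact List.mem_append_left _ hx)
    have nnLo : ∀ x ∈ lo, 0 ≤ x := fun x hx => nnA x (by rw [hA]; exact List.mem_append_right _ hx)
    have sB' : List.Pairwise (· ≤ ·) (hi.reverse ++ removed) := hB ▸ sB
    obtain ⟨sHiR, sRem, crossHR⟩ := List.pairwise_append.mp sB'
    have sA' : List.Pairwise (· ≥ ·) (hi ++ lo) := hA ▸ sA
    obtain ⟨sHi, sLo, crossAL⟩ := List.pairwise_append.mp sA'
    rw [aGo_cons, bGoRef_cons, negMap_insDesc]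
    by_cases hov : n < total + e
    · by_cases hk : kA = 0
      · -- A has no invincibility left and breaks; B's spend also exceeds n
        have hrl : (removed.length : Int) = k0 := by omega
        have hhi : hi = [] := List.eq_nil_of_length_eq_zero (by omega)
        subst hhi
        simp only [List.reverse_nil, List.nil_append] at hB
        have hpop : k0 < ((insAsc e heapB).length : Int) := by rw [hlenB]; push_cast; omega
        have husedt : used = total := by simpa using hused
        rw [if_pos hov, if_pos hk, if_pos hpop]
        rcases hrm : removed with _ | ⟨r0, rt⟩
        · rw [hrm] at hB; subst hB
          show rounds = if n < used + e then rounds else _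
          rw [if_pos (by omega)]
        · rw [hrm] at hB; subst hB
          by_cases her : e ≤ r0
          · rw [insAsc_cons_of_le _ her]
            show rounds = if n < used + e then rounds else _
            rw [if_pos (by omega)]
          · rw [insAsc_cons_of_gt _ (by omega)]
            show rounds = if n < used + r0 then rounds else _
            have := hiv r0 (by rw [hrm]; simp)
            rw [if_pos (by omega)]
      · -- A pops the largest round seen so far
        have hkA1 : 1 ≤ kA := by omega
        by_cases hP : ∀ x ∈ heapA, x ≤ e
        · -- the freshly pushed e is itself the maximum: A pops it back
          have hdese : insDesc e heapA = e :: heapA := insDesc_eq_cons hP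
          rw [hdese, negMap_cons, if_pos hov, if_neg hk]
          show aGo n (kA - 1) (rounds + 1) (total + e + -e) (negMap heapA) rest = _
          have harg : total + e + -e = total := by ring
          rw [harg]
          by_cases hfull : (heapB.length : Int) = k0
          · -- B's heap is full, so B pops too
            have hhine : hi ≠ [] := by
              intro hh; rw [hh] at hBlenZ; simp at hBlenZ; omega
            rcases hrev : hi.reverse with _ | ⟨hB0, w⟩
            · exact absurd (by simpa using congrArg List.reverse hrev) hhine
            have hiEq : hi = w.reverse ++ [hB0] := by
              rw [← List.reverse_reverse hi, hrev]; simp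
            have hBc : heapB = hB0 :: (w ++ removed) := by rw [hB, hrev]; simp
            have hB0hi : hB0 ∈ hi := by rw [hiEq]; simp
            have hB0A : hB0 ∈ heapA := by rw [hA]; exact List.mem_append_left _ hB0hi
            have hwhi : ∀ x ∈ w, x ∈ hi := by
              intro x hx; rw [hiEq]; simp [hx]
            have hsum : hi.sum = w.reverse.sum + hB0 := by rw [hiEq]; simp
            have hwsum : 0 ≤ w.reverse.sum :=
              sum_nonneg' (fun x hx => nnHi x (hwhi x (by simpa using hx)))
            have hB0w : ∀ x ∈ w ++ removed, hB0 ≤ x := by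
              have := List.pairwise_cons.mp (hBc ▸ sB)
              exact this.1
            have hpop : k0 < ((insAsc e heapB).length : Int) := by rw [hlenB]; push_cast; omega
            rw [if_pos hpop]
            by_cases hem : e ≤ hB0
            · -- then every element of hi equals e
              have heB0 : e = hB0 := le_antisymm hem (hP hB0 hB0A)
              have hwe : ∀ x ∈ w, x = e := by
                intro x hx
                have h1 := hB0w x (List.mem_append_left _ hx)
                have h2 := hP x (by rw [hA]; exact List.mem_append_left _ (hwhi x hx))
                omega
              rw [hBc, insAsc_cons_of_le _ hem, ← hBc]
              show _ = if n < used + e then rounds else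
                bGoRef n k0 (rounds + 1) (used + e) heapB rest
              rw [if_neg (by omega)]
              apply ih hnn'
              refine ⟨w.reverse, hB0 :: lo, e :: removed, ?_, ?_, sA, sB, nnA, ?_, ?_, ?_, by omega, ?_, ?_, by omega, Or.inr hfull, hlen⟩
              · rw [hA, hiEq]; simp
              · -- heapB = w ++ e :: removed
                rw [List.reverse_reverse]
                apply asc_eq'
                · rw [hBc, heB0]
                  simp only [← Multiset.coe_add, ← Multiset.cons_coe, Multiset.coe_reverse,
                    ← Multiset.singleton_add, List.append_assoc]
                  abel
                · exact sB
                · refine List.pairwise_append.mpr ⟨?_, ?_, ?_⟩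
                  · have := List.pairwise_cons.mp (hBc ▸ sB)
                    exact (List.pairwise_append.mp this.2).1
                  · refine List.pairwise_cons.mpr ⟨?_, sRem⟩
                    intro r hr
                    exact heB0 ▸ crossHR hB0 (by rw [hrev]; simp) r hr
                  · intro x hx y hy
                    have hxe := hwe x hx
                    rcases List.mem_cons.mp hy with rfl | hy
                    · omega
                    · have := crossHR hB0 (by rw [hrev]; simp) y hy; omega
              · intro r hr
                rcases List.mem_cons.mp hr with rfl | hr
                · exact he
                · exact nnR r hr
              · intro x hx r hr
                rcases List.mem_cons.mp hr with rfl | hr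
                · exact hP x hx
                · exact hbnd x hx r hr
              · omega
              · intro r hr
                rcases List.mem_cons.mp hr with rfl | hr
                · omega
                · exact hiv r hr
              · simp only [List.length_cons]; push_cast; omega
            · -- e is larger than B's minimum hB0: B pops hB0
              rw [hBc, insAsc_cons_of_gt _ (by omega)]
              show _ = if n < used + hB0 then rounds else
                bGoRef n k0 (rounds + 1) (used + hB0) (insAsc e (w ++ removed)) rest
              rw [if_neg (by omega)]
              apply ih hnn'
              have hlen2 : ((insAsc e (w ++ removed)).length : Int) = (heapB.length : Int) := by
                rw [insAsc_length, hBc]; simp [List.length_append]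
              refine ⟨w.reverse, hB0 :: lo, insAsc e removed, ?_, ?_, sA, ?_, nnA, ?_, ?_, ?_, by omega, ?_, ?_, by omega, Or.inr (by omega), by omega⟩
              · rw [hA, hiEq]; simp
              · -- insAsc e (w ++ removed) = w ++ insAsc e removed
                rw [List.reverse_reverse]
                apply asc_eq'
                · simp only [insAsc_coe, ← Multiset.coe_add, ← Multiset.cons_coe,
                    Multiset.coe_reverse, ← Multiset.singleton_add, List.append_assoc]
                  abel
                · exact insAsc_pairwise (by
                    have := List.pairwise_cons.mp (hBc ▸ sB); exact this.2) e
                · refine List.pairwise_append.mpr ⟨?_, insAsc_pairwise sRem e, ?_⟩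
                  · have := List.pairwise_cons.mp (hBc ▸ sB)
                    exact (List.pairwise_append.mp this.2).1
                  · intro x hx y hy
                    have hxA : x ∈ heapA := by
                      rw [hA]; exact List.mem_append_left _ (hwhi x hx)
                    rcases insAsc_mem hy with rfl | hy
                    · exact hP x hxA
                    · exact hbnd x hxA y hy
              · exact insAsc_pairwise (List.pairwise_cons.mp (hBc ▸ sB)).2 e
              · intro r hr
                rcases insAsc_mem hr with rfl | hr
                · exact he
                · exact nnR r hr
              · intro x hx r hr
                rcases insAsc_mem hr with rfl | hr
                · exact hP x hx
                · exact hbnd x hx r hr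
              · omega
              · intro r hr
                rcases insAsc_mem hr with rfl | hr
                · omega
                · exact hiv r hr
              · rw [insAsc_length]; push_cast; omega
          · -- B's heap not yet full: B only pushes
            have hlo : lo = [] := by
              rcases hdisj with h | h
              · exact h
              · exact absurd h hfull
            have hA2 : heapA = hi := by rw [hA, hlo, List.append_nil]
            rw [if_neg (by rw [hlenB]; push_cast; omega)]
            apply ih hnn'
            refine ⟨heapA, [], insAsc e removed, by simp, ?_, sA, ?_, nnA, ?_, ?_, by rw [← hA2] at hused; exact hused, htot, ?_, ?_, by omega, Or.inl rfl, by rw [hlenB]; push_cast; omega⟩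
            · -- insAsc e heapB = heapA.reverse ++ insAsc e removed
              apply asc_eq'
              · rw [hB, hA2]
                simp only [insAsc_coe, ← Multiset.coe_add, ← Multiset.cons_coe,
                  Multiset.coe_reverse, ← Multiset.singleton_add, List.append_assoc]
                abel
              · exact insAsc_pairwise sB e
              · refine List.pairwise_append.mpr ⟨?_, insAsc_pairwise sRem e, ?_⟩
                · exact pw_rev.mp sA
                · intro x hx y hy
                  have hxA : x ∈ heapA := by simpa using hx
                  rcases insAsc_mem hy with rfl | hy
                  · exact hP x hxA
                  · exact hbnd x hxA y hy
            · exact insAsc_pairwise sB e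
            · intro r hr
              rcases insAsc_mem hr with rfl | hr
              · exact he
              · exact nnR r hr
            · intro x hx r hr
              rcases insAsc_mem hr with rfl | hr
              · exact hP x hx
              · exact hbnd x hx r hr
            · intro r hr
              rcases insAsc_mem hr with rfl | hr
              · omega
              · exact hiv r hr
            · rw [insAsc_length]; push_cast; omega
        · -- the maximum is the old head h0 > e
          push_neg at hP
          obtain ⟨x0, hx0, hex0⟩ := hP
          rcases heapA with _ | ⟨h0, tA⟩
          · simp at hx0
          obtain ⟨hh0, stA⟩ := List.pairwise_cons.mp sA
          have he0 : e < h0 := by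
            rcases List.mem_cons.mp hx0 with rfl | hx
            · exact hex0
            · have := hh0 x0 hx; omega
          rw [insDesc_cons_of_gt _ he0, negMap_cons, if_pos hov, if_neg hk]
          show aGo n (kA - 1) (rounds + 1) (total + e + -h0) (negMap (insDesc e tA)) rest = _
          have harg : total + e + -h0 = total + e - h0 := by ring
          rw [harg]
          have hh0A : h0 ∈ h0 :: tA := by simp
          have hnnh0 : 0 ≤ h0 := nnA h0 hh0A
          have hhine : hi ≠ [] := by
            intro hh
            rw [hh] at hA hBlenZ
            simp only [List.nil_append] at hA
            simp only [List.length_nil] at hBlenZ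
            rcases hdisj with h | h
            · rw [h] at hA; simp at hA
            · omega
          rcases hi with _ | ⟨hd, hiT⟩
          · exact absurd rfl hhine
          simp only [List.cons_append] at hA
          injection hA with hh1 hh2
          subst hd
          -- common pieces of the new invariant (A's new heap is insDesc e tA in all cases)
          have sAnew : List.Pairwise (· ≥ ·) (insDesc e tA) := insDesc_pairwise stA e
          have nnAnew : ∀ x ∈ insDesc e tA, 0 ≤ x := by
            intro x hx
            rcases insDesc_mem hx with rfl | hx
            · exact he
            · exact nnA x (List.mem_cons_of_mem h0 hx)
          have nnRnew : ∀ r ∈ h0 :: removed, 0 ≤ r := by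
            intro r hr
            rcases List.mem_cons.mp hr with rfl | hr
            · exact hnnh0
            · exact nnR r hr
          have bndnew : ∀ x ∈ insDesc e tA, ∀ r ∈ h0 :: removed, x ≤ r := by
            intro x hx r hr
            have hx' : x = e ∨ x ∈ tA := insDesc_mem hx
            rcases List.mem_cons.mp hr with rfl | hr
            · rcases hx' with rfl | hx'
              · omega
              · exact hh0 x hx'
            · rcases hx' with rfl | hx'
              · have := hbnd h0 hh0A r hr; omega
              · exact hbnd x (List.mem_cons_of_mem h0 hx') r hr
          have ivnew : ∀ r ∈ h0 :: removed, n - r < total + e - h0 := by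
            intro r hr
            rcases List.mem_cons.mp hr with rfl | hr
            · omega
            · have := hiv r hr; have := hbnd h0 hh0A r hr; omega
          by_cases hfull : (heapB.length : Int) = k0
          · -- B pops as well
            rcases hiT with _ | ⟨t0, hiT'⟩
            · -- hi = [h0]
              have htAlo : tA = lo := by simpa using hh2
              have hBc : heapB = h0 :: removed := by rw [hB]; simp
              have hpop : k0 < ((insAsc e heapB).length : Int) := by rw [hlenB]; push_cast; omega
              rw [if_pos hpop, hBc, insAsc_cons_of_le _ (le_of_lt he0), ← hBc]
              show _ = if n < used + e then rounds else
                bGoRef n k0 (rounds + 1) (used + e) heapB rest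
              have husum : used = total - h0 := by simpa using hused
              rw [if_neg (by omega)]
              apply ih hnn'
              refine ⟨[], insDesc e lo, h0 :: removed, ?_, ?_, sAnew, sB, nnAnew, nnRnew, bndnew, ?_, by omega, ivnew, ?_, by omega, Or.inr hfull, hlen⟩
              · rw [htAlo]; simp
              · rw [hBc]; simp
              · simp only [List.nil_append, List.sum_nil]; omega
              · simp only [List.length_cons]; push_cast; omega
            · -- hi has at least two elements: decompose its last element hB0
              rcases hrev2 : (t0 :: hiT').reverse with _ | ⟨hB0, u⟩
              · exact absurd hrev2 (by simp)
              have hiTEq : t0 :: hiT' = u.reverse ++ [hB0] := by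
                rw [← List.reverse_reverse (t0 :: hiT'), hrev2]; simp
              have hBc : heapB = hB0 :: (u ++ ([h0] ++ removed)) := by
                rw [hB, hiTEq]; simp
              obtain ⟨hB0le, sTail⟩ := List.pairwise_cons.mp (hBc ▸ sB)
              obtain ⟨sHiT, sLo2, crossTL⟩ := List.pairwise_append.mp (hh2 ▸ stA)
              have hmemTA : ∀ x ∈ t0 :: hiT', x ∈ tA := by
                intro x hx; rw [hh2]; exact List.mem_append_left _ hx
              have hB0TA : hB0 ∈ t0 :: hiT' := by rw [hiTEq]; simp
              have huT : ∀ x ∈ u, x ∈ t0 :: hiT' := by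
                intro x hx; rw [hiTEq]; simp [hx]
              have hulehh : ∀ x ∈ u, x ≤ h0 := fun x hx => hh0 x (hmemTA x (huT x hx))
              have huleR : ∀ x ∈ u, ∀ r ∈ removed, x ≤ r := fun x hx r hr =>
                hbnd x (List.mem_cons_of_mem h0 (hmemTA x (huT x hx))) r hr
              have hB0geu : ∀ x ∈ u, hB0 ≤ x := fun x hx => hB0le x (List.mem_append_left _ hx)
              have hsumT : (t0 :: hiT').sum = u.reverse.sum + hB0 := by rw [hiTEq]; simp
              have huNN : 0 ≤ u.reverse.sum := by
                apply sum_nonneg'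
                intro x hx
                rw [List.mem_reverse] at hx
                exact nnA x (List.mem_cons_of_mem h0 (hmemTA x (huT x hx)))
              have husum : used = total - (h0 + (t0 :: hiT').sum) := by simpa using hused
              have hnnB0 : 0 ≤ hB0 := nnA hB0 (List.mem_cons_of_mem h0 (hmemTA hB0 hB0TA))
              have hpop : k0 < ((insAsc e heapB).length : Int) := by rw [hlenB]; push_cast; omega
              rw [if_pos hpop]
              by_cases hem : e ≤ hB0
              · rw [hBc, insAsc_cons_of_le _ hem, ← hBc]
                show _ = if n < used + e then rounds else
                  bGoRef n k0 (rounds + 1) (used + e) heapB rest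
                rw [if_neg (by omega)]
                apply ih hnn'
                have sNew : List.Pairwise (· ≥ ·) ((t0 :: hiT') ++ insDesc e lo) := by
                  refine List.pairwise_append.mpr ⟨sHiT, insDesc_pairwise sLo2 e, ?_⟩
                  intro x hx y hy
                  have hxin : x ∈ u ∨ x = hB0 := by
                    rw [hiTEq] at hx; simp at hx; tauto
                  rcases insDesc_mem hy with rfl | hy
                  · rcases hxin with hxin | rfl
                    · have := hB0geu x hxin; omega
                    · omega
                  · exact crossTL x hx y hy
                refine ⟨t0 :: hiT', insDesc e lo, h0 :: removed, ?_, ?_, sAnew, sB, nnAnew, nnRnew, bndnew, ?_, by omega, ivnew, ?_, by omega, Or.inr hfull, hlen⟩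
                · -- insDesc e tA = (t0::hiT') ++ insDesc e lo
                  apply desc_eq'
                  · rw [hh2]
                    simp only [insDesc_coe, ← Multiset.coe_add, ← Multiset.cons_coe,
                      ← Multiset.singleton_add]
                    abel
                  · exact sAnew
                  · exact sNew
                · rw [hBc, hiTEq]; simp
                · simp only [List.sum_cons] at husum ⊢; omega
                · simp only [List.length_cons]; push_cast; omega
              · -- e > hB0 : B pops hB0
                rw [hBc, insAsc_cons_of_gt _ (by omega)]
                show _ = if n < used + hB0 then rounds else
                  bGoRef n k0 (rounds + 1) (used + hB0) (insAsc e (u ++ ([h0] ++ removed))) rest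
                rw [if_neg (by omega)]
                apply ih hnn'
                have sURev : List.Pairwise (· ≥ ·) u.reverse :=
                  (List.pairwise_append.mp (hiTEq ▸ sHiT)).1
                have sNewA : List.Pairwise (· ≥ ·) (insDesc e u.reverse ++ (hB0 :: lo)) := by
                  refine List.pairwise_append.mpr ⟨insDesc_pairwise sURev e, ?_, ?_⟩
                  · refine List.pairwise_cons.mpr ⟨?_, sLo2⟩
                    intro b hb
                    exact crossTL hB0 hB0TA b hb
                  · intro x hx y hy
                    have hx' : x = e ∨ x ∈ u := by
                      rcases insDesc_mem hx with rfl | hx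
                      · exact Or.inl rfl
                      · exact Or.inr (by simpa using hx)
                    rcases List.mem_cons.mp hy with rfl | hy
                    · rcases hx' with rfl | hx'
                      · omega
                      · have := hB0geu x hx'; omega
                    · rcases hx' with rfl | hx'
                      · have := crossTL hB0 hB0TA y hy; omega
                      · exact crossTL x (huT x hx') y hy
                refine ⟨insDesc e u.reverse, hB0 :: lo, h0 :: removed, ?_, ?_, sAnew, ?_, nnAnew, nnRnew, bndnew, ?_, by omega, ivnew, ?_, by omega, Or.inr ?_, ?_⟩
                · -- insDesc e tA = insDesc e u.reverse ++ (hB0 :: lo)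
                  apply desc_eq'
                  · rw [hh2, hiTEq]
                    simp only [insDesc_coe, ← Multiset.coe_add, ← Multiset.cons_coe,
                      Multiset.coe_reverse, ← Multiset.singleton_add, List.append_assoc]
                    abel
                  · exact sAnew
                  · exact sNewA
                · -- insAsc e (u ++ [h0] ++ removed) = (insDesc e u.reverse).reverse ++ (h0 :: removed)
                  apply asc_eq'
                  · simp only [insAsc_coe, insDesc_coe, ← Multiset.coe_add, ← Multiset.cons_coe,
                      Multiset.coe_reverse, ← Multiset.singleton_add, List.append_assoc]
                    abel
                  · exact insAsc_pairwise sTail e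
                  · refine List.pairwise_append.mpr ⟨pw_rev.mp (insDesc_pairwise sURev e), ?_, ?_⟩
                    · refine List.pairwise_cons.mpr ⟨?_, sRem⟩
                      intro r hr
                      exact hbnd h0 hh0A r hr
                    · intro x hx y hy
                      have hx' : x = e ∨ x ∈ u := by
                        rw [List.mem_reverse] at hx
                        rcases insDesc_mem hx with rfl | hx
                        · exact Or.inl rfl
                        · exact Or.inr (by simpa using hx)
                      rcases List.mem_cons.mp hy with rfl | hy
                      · rcases hx' with rfl | hx'
                        · omega
                        · exact hulehh x hx'
                      · rcases hx' with rfl | hx'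
                        · have := hbnd h0 hh0A y hy; omega
                        · exact huleR x hx' y hy
                · exact insAsc_pairwise sTail e
                · simp only [List.sum_cons, insDesc_sum] at husum hsumT ⊢
                  omega
                · simp only [List.length_cons]; push_cast; omega
                · rw [insAsc_length]
                  have hl2 : (heapB.length : Int) = ((u ++ ([h0] ++ removed)).length : Int) + 1 := by
                    rw [hBc]; simp
                  push_cast at hl2 ⊢
                  omega
                · rw [insAsc_length]
                  have hl2 : (heapB.length : Int) = ((u ++ ([h0] ++ removed)).length : Int) + 1 := by
                    rw [hBc]; simp
                  push_cast at hl2 ⊢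
                  omega
          · -- B's heap not full: B only pushes
            have hlo : lo = [] := by
              rcases hdisj with h | h
              · exact h
              · exact absurd h hfull
            have htAhiT : tA = hiT := by rw [hh2, hlo, List.append_nil]
            have husum : used = total - (h0 + hiT.sum) := by simpa using hused
            rw [if_neg (by rw [hlenB]; push_cast; omega)]
            apply ih hnn'
            refine ⟨insDesc e tA, [], h0 :: removed, by simp, ?_, sAnew, ?_, nnAnew, nnRnew, bndnew, ?_, by omega, ivnew, ?_, by omega, Or.inl rfl, by rw [hlenB]; push_cast; omega⟩
            · -- insAsc e heapB = (insDesc e tA).reverse ++ (h0 :: removed)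
              apply asc_eq'
              · rw [hB, htAhiT]
                simp only [insAsc_coe, insDesc_coe, ← Multiset.coe_add, ← Multiset.cons_coe,
                  Multiset.coe_reverse, ← Multiset.singleton_add, List.append_assoc]
                abel
              · exact insAsc_pairwise sB e
              · refine List.pairwise_append.mpr ⟨pw_rev.mp sAnew, ?_, ?_⟩
                · refine List.pairwise_cons.mpr ⟨?_, sRem⟩
                  intro r hr
                  exact hbnd h0 hh0A r hr
                · intro x hx y hy
                  have hx' : x = e ∨ x ∈ tA := by
                    rw [List.mem_reverse] at hx
                    exact insDesc_mem hx
                  rcases List.mem_cons.mp hy with rfl | hy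
                  · rcases hx' with rfl | hx'
                    · omega
                    · exact hh0 x hx'
                  · rcases hx' with rfl | hx'
                    · have := hbnd h0 hh0A y hy; omega
                    · exact hbnd x (List.mem_cons_of_mem h0 hx') y hy
            · exact insAsc_pairwise sB e
            · simp only [List.append_nil, insDesc_sum, htAhiT]
              omega
            · simp only [List.length_cons]; push_cast; omega
    · -- no overflow: A just pushes, and e is at most every removed round
      rw [if_neg hov]
      have hSe : ∀ r ∈ removed, e ≤ r := by
        intro r hr
        have := hiv r hr
        omega
      by_cases hfull : (heapB.length : Int) = k0
      · -- B's heap is full: B pushes and pops the minimum, which stays at most n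
        have hpop : k0 < ((insAsc e heapB).length : Int) := by rw [hlenB]; push_cast; omega
        rcases hrev : hi.reverse with _ | ⟨hB0, w⟩
        · -- hi = []
          have hhi : hi = [] := by simpa using congrArg List.reverse hrev
          subst hhi
          simp only [List.nil_append] at hA
          simp only [List.reverse_nil, List.nil_append] at hB
          have husedt : used = total := by simpa using hused
          rcases hrm : removed with _ | ⟨r0, rt⟩
          · -- B's heap is empty (k = 0): B pops e straight back
            subst hrm
            have hBe : heapB = [] := by rw [hB]
            have hk00 : k0 = 0 := by
              have : (heapB.length : Int) = 0 := by rw [hBe]; simp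
              omega
            rw [if_pos hpop, hBe]
            show _ = if n < used + e then rounds else bGoRef n k0 (rounds + 1) (used + e) [] rest
            rw [if_neg (by omega)]
            apply ih hnn'
            refine ⟨[], insDesc e heapA, [], by simp, by simp, insDesc_pairwise sA e, by simp, ?_, by simp, ?_, ?_, by omega, ?_, ?_, by omega, Or.inr (by simp; omega), by simp; omega⟩
            · intro x hx
              rcases insDesc_mem hx with rfl | hx
              · exact he
              · exact nnA x hx
            · intro x hx r hr
              simp at hr
            · simp only [List.sum_nil]; omega
            · intro r hr
              simp at hr
            · simp at hkA ⊢; omega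
          · -- B pops e back (e is at most the smallest removed round)
            subst hrm
            have hBc : heapB = r0 :: rt := by rw [hB]
            rw [if_pos hpop, hBc, insAsc_cons_of_le _ (hSe r0 (by simp)), ← hBc]
            show _ = if n < used + e then rounds else bGoRef n k0 (rounds + 1) (used + e) heapB rest
            rw [if_neg (by omega)]
            apply ih hnn'
            refine ⟨[], insDesc e heapA, r0 :: rt, by simp, by rw [hBc]; simp, insDesc_pairwise sA e, sB, ?_, nnR, ?_, ?_, by omega, ?_, hkA, by omega, Or.inr hfull, hlen⟩
            · intro x hx
              rcases insDesc_mem hx with rfl | hx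
              · exact he
              · exact nnA x hx
            · intro x hx r hr
              rcases insDesc_mem hx with rfl | hx
              · exact hSe r hr
              · exact hbnd x hx r hr
            · simp only [List.sum_nil]; omega
            · intro r hr
              have := hiv r hr
              omega
        · -- hi ends in its minimum hB0
          have hiEq : hi = w.reverse ++ [hB0] := by
            rw [← List.reverse_reverse hi, hrev]; simp
          have hBc : heapB = hB0 :: (w ++ removed) := by rw [hB, hiEq]; simp
          have hB0hi : hB0 ∈ hi := by rw [hiEq]; simp
          have hB0A : hB0 ∈ heapA := by rw [hA]; exact List.mem_append_left _ hB0hi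
          have hnnB0 : 0 ≤ hB0 := nnA hB0 hB0A
          have hsum : hi.sum = w.reverse.sum + hB0 := by rw [hiEq]; simp
          obtain ⟨hB0le, sTail⟩ := List.pairwise_cons.mp (hBc ▸ sB)
          obtain ⟨sW, sRem2, crossWR⟩ := List.pairwise_append.mp sTail
          have hw_hi : ∀ x ∈ w, x ∈ hi := by
            intro x hx; rw [hiEq]; exact List.mem_append_left _ (by simpa using hx)
          have hwNN : 0 ≤ w.reverse.sum := by
            apply sum_nonneg'
            intro x hx
            rw [List.mem_reverse] at hx
            exact nnHi x (hw_hi x hx)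
          have hB0min : ∀ x ∈ hi, hB0 ≤ x := by
            intro x hx
            rw [hiEq] at hx
            rcases List.mem_append.mp hx with hx | hx
            · exact hB0le x (List.mem_append_left _ (by simpa using hx))
            · simp at hx; omega
          by_cases hem : e ≤ hB0
          · -- B pops e straight back
            rw [if_pos hpop, hBc, insAsc_cons_of_le _ hem, ← hBc]
            show _ = if n < used + e then rounds else bGoRef n k0 (rounds + 1) (used + e) heapB rest
            rw [if_neg (by omega)]
            apply ih hnn'
            refine ⟨hi, insDesc e lo, removed, ?_, hB, insDesc_pairwise sA e, sB, ?_, nnR, ?_, ?_, by omega, ?_, hkA, by omega, Or.inr hfull, hlen⟩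
            · -- insDesc e heapA = hi ++ insDesc e lo
              apply desc_eq'
              · rw [hA]
                simp only [insDesc_coe, ← Multiset.coe_add, ← Multiset.cons_coe,
                  ← Multiset.singleton_add]
                abel
              · exact insDesc_pairwise sA e
              · refine List.pairwise_append.mpr ⟨sHi, insDesc_pairwise sLo e, ?_⟩
                intro x hx y hy
                rcases insDesc_mem hy with rfl | hy
                · have := hB0min x hx; omega
                · exact crossAL x hx y hy
            · intro x hx
              rcases insDesc_mem hx with rfl | hx
              · exact he
              · exact nnA x hx
            · intro x hx r hr
              rcases insDesc_mem hx with rfl | hx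
              · exact hSe r hr
              · exact hbnd x hx r hr
            · omega
            · intro r hr
              have := hiv r hr
              omega
          · -- e > hB0 : B pops hB0 instead
            rw [if_pos hpop, hBc, insAsc_cons_of_gt _ (by omega)]
            show _ = if n < used + hB0 then rounds else
              bGoRef n k0 (rounds + 1) (used + hB0) (insAsc e (w ++ removed)) rest
            rw [if_neg (by omega)]
            apply ih hnn'
            have sWrev : List.Pairwise (· ≥ ·) w.reverse := pw_rev.mpr (by simpa using sW)
            refine ⟨insDesc e w.reverse, hB0 :: lo, removed, ?_, ?_, insDesc_pairwise sA e, insAsc_pairwise sTail e, ?_, nnR, ?_, ?_, by omega, ?_, hkA, by omega, Or.inr ?_, ?_⟩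
            · -- insDesc e heapA = insDesc e w.reverse ++ (hB0 :: lo)
              apply desc_eq'
              · rw [hA, hiEq]
                simp only [insDesc_coe, ← Multiset.coe_add, ← Multiset.cons_coe,
                  Multiset.coe_reverse, ← Multiset.singleton_add, List.append_assoc]
                abel
              · exact insDesc_pairwise sA e
              · refine List.pairwise_append.mpr ⟨insDesc_pairwise sWrev e, ?_, ?_⟩
                · refine List.pairwise_cons.mpr ⟨?_, sLo⟩
                  intro b hb
                  exact crossAL hB0 hB0hi b hb
                · intro x hx y hy
                  have hx' : x = e ∨ x ∈ w := by
                    rcases insDesc_mem hx with rfl | hx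
                    · exact Or.inl rfl
                    · exact Or.inr (by simpa using hx)
                  rcases List.mem_cons.mp hy with rfl | hy
                  · rcases hx' with rfl | hx'
                    · omega
                    · exact hB0le x (List.mem_append_left _ hx')
                  · rcases hx' with rfl | hx'
                    · have := crossAL hB0 hB0hi y hy; omega
                    · exact crossAL x (hw_hi x hx') y hy
            · -- insAsc e (w ++ removed) = (insDesc e w.reverse).reverse ++ removed
              apply asc_eq'
              · simp only [insAsc_coe, insDesc_coe, ← Multiset.coe_add, ← Multiset.cons_coe,
                  Multiset.coe_reverse, ← Multiset.singleton_add]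
                abel
              · exact insAsc_pairwise sTail e
              · refine List.pairwise_append.mpr ⟨pw_rev.mp (insDesc_pairwise sWrev e), sRem2, ?_⟩
                intro x hx y hy
                have hx' : x = e ∨ x ∈ w := by
                  rw [List.mem_reverse] at hx
                  rcases insDesc_mem hx with rfl | hx
                  · exact Or.inl rfl
                  · exact Or.inr (by simpa using hx)
                rcases hx' with rfl | hx'
                · exact hSe y hy
                · exact crossWR x hx' y hy
            · intro x hx
              rcases insDesc_mem hx with rfl | hx
              · exact he
              · exact nnA x hx
            · intro x hx r hr
              rcases insDesc_mem hx with rfl | hx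
              · exact hSe r hr
              · exact hbnd x hx r hr
            · simp only [insDesc_sum]; omega
            · intro r hr
              have := hiv r hr
              omega
            · rw [insAsc_length]
              have hl2 : (heapB.length : Int) = ((w ++ removed).length : Int) + 1 := by
                rw [hBc]; simp
              push_cast at hl2 ⊢
              omega
            · rw [insAsc_length]
              have hl2 : (heapB.length : Int) = ((w ++ removed).length : Int) + 1 := by
                rw [hBc]; simp
              push_cast at hl2 ⊢
              omega
      · -- B's heap is not full: both sides just push
        have hlo : lo = [] := by
          rcases hdisj with h | h
          · exact h
          · exact absurd h hfull
        have hA2 : heapA = hi := by rw [hA, hlo, List.append_nil]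
        have hused2 : used = total - heapA.sum := by rw [hA2]; exact hused
        rw [if_neg (by rw [hlenB]; push_cast; omega)]
        apply ih hnn'
        refine ⟨insDesc e heapA, [], removed, by simp, ?_, insDesc_pairwise sA e, insAsc_pairwise sB e, ?_, nnR, ?_, ?_, by omega, ?_, hkA, by omega, Or.inl rfl, by rw [hlenB]; push_cast; omega⟩
        · -- insAsc e heapB = (insDesc e heapA).reverse ++ removed
          apply asc_eq'
          · rw [hB, hA2]
            simp only [insAsc_coe, insDesc_coe, ← Multiset.coe_add, ← Multiset.cons_coe,
              Multiset.coe_reverse, ← Multiset.singleton_add]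
            abel
          · exact insAsc_pairwise sB e
          · refine List.pairwise_append.mpr ⟨pw_rev.mp (insDesc_pairwise sA e), sRem, ?_⟩
            intro x hx y hy
            have hx' : x = e ∨ x ∈ heapA := by
              rw [List.mem_reverse] at hx
              exact insDesc_mem hx
            rcases hx' with rfl | hx'
            · exact hSe y hy
            · exact hbnd x hx' y hy
        · intro x hx
          rcases insDesc_mem hx with rfl | hx
          · exact he
          · exact nnA x hx
        · intro x hx r hr
          rcases insDesc_mem hx with rfl | hx
          · exact hSe r hr
          · exact hbnd x hx r hr
        · simp only [insDesc_sum]; omega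
        · intro r hr
          have := hiv r hr
          omega


-- For n < 0 every round overflows: A burns one invincibility per round, B's first pop
-- already exceeds n; both survive exactly min k (#rounds) rounds.
theorem aGo_neg (n : Int) (hn : n < 0) :
    ∀ (rest : List Int), (∀ e ∈ rest, 0 ≤ e) →
    ∀ (kA rounds : Int) (heapA : List Int), 0 ≤ kA → (∀ x ∈ heapA, 0 ≤ x) →
      aGo n kA rounds heapA.sum (negMap heapA) rest = rounds + min kA (rest.length : Int) := by
  intro rest
  induction rest with
  | nil =>
    intro _ kA rounds heapA hkA _
    show rounds = rounds + min kA ((List.length [] : Int))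
    simp only [List.length_nil]
    omega
  | cons e rest ih =>
    intro hnn kA rounds heapA hkA nnA
    have he : 0 ≤ e := hnn e (by simp)
    have hnn' : ∀ x ∈ rest, 0 ≤ x := fun x hx => hnn x (by simp [hx])
    rw [aGo_cons, negMap_insDesc]
    have hsum : 0 ≤ heapA.sum := sum_nonneg' nnA
    rw [if_pos (by omega)]
    by_cases hk : kA = 0
    · rw [if_pos hk]
      simp only [List.length_cons, hk]
      push_cast
      omega
    · rw [if_neg hk]
      rcases hd : insDesc e heapA with _ | ⟨m, hs⟩
      · have := (insDesc_perm e heapA).length_eq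
        rw [hd] at this
        simp at this
      rw [negMap_cons]
      show aGo n (kA - 1) (rounds + 1) (heapA.sum + e + -m) (negMap hs) rest = _
      have hps : m + hs.sum = e + heapA.sum := by
        have h2 := (insDesc_perm e heapA).sum_eq
        rw [hd] at h2
        simpa using h2
      have harg : heapA.sum + e + -m = hs.sum := by omega
      rw [harg]
      have nnhs : ∀ x ∈ hs, 0 ≤ x := by
        intro x hx
        have hx2 : x ∈ e :: heapA := (insDesc_perm e heapA).mem_iff.mp (by rw [hd]; simp [hx])
        rcases List.mem_cons.mp hx2 with rfl | hx2
        · exact he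
        · exact nnA x hx2
      rw [ih hnn' (kA - 1) (rounds + 1) hs (by omega) nnhs]
      simp only [List.length_cons]
      push_cast
      omega

theorem bGoRef_neg (n k0 : Int) (hn : n < 0) :
    ∀ (rest : List Int), (∀ e ∈ rest, 0 ≤ e) →
    ∀ (i used : Int) (heapB : List Int), 0 ≤ used → (∀ x ∈ heapB, 0 ≤ x) →
      (heapB.length : Int) ≤ k0 →
      bGoRef n k0 i used heapB rest = i + min (k0 - heapB.length) (rest.length : Int) := by
  intro rest
  induction rest with
  | nil =>
    intro _ i used heapB _ _ hlen
    show i = i + min (k0 - heapB.length) ((List.length [] : Int))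
    simp only [List.length_nil]
    omega
  | cons e rest ih =>
    intro hnn i used heapB hused nnB hlen
    have he : 0 ≤ e := hnn e (by simp)
    have hnn' : ∀ x ∈ rest, 0 ≤ x := fun x hx => hnn x (by simp [hx])
    have hlenB := insAsc_length e heapB
    rw [bGoRef_cons]
    by_cases hfull : k0 < ((insAsc e heapB).length : Int)
    · rw [if_pos hfull]
      have hfk : (heapB.length : Int) = k0 := by
        rw [hlenB] at hfull
        push_cast at hfull
        omega
      rcases hd : insAsc e heapB with _ | ⟨m, hs⟩
      · have := (insAsc_perm e heapB).length_eq
        rw [hd] at this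
        simp at this
      have hm : 0 ≤ m := by
        have hx2 : m ∈ e :: heapB := (insAsc_perm e heapB).mem_iff.mp (by rw [hd]; simp)
        rcases List.mem_cons.mp hx2 with rfl | hx2
        · exact he
        · exact nnB m hx2
      show (if n < used + m then i else _) = _
      rw [if_pos (by omega)]
      rw [hd] at hlenB
      simp only [List.length_cons] at hlenB ⊢
      push_cast
      omega
    · rw [if_neg hfull]
      have nnB' : ∀ x ∈ insAsc e heapB, 0 ≤ x := by
        intro x hx
        rcases insAsc_mem hx with rfl | hx
        · exact he
        · exact nnB x hx
      have hle2 : ((insAsc e heapB).length : Int) ≤ k0 := by omega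
      rw [ih hnn' (i + 1) used (insAsc e heapB) hused nnB' hle2]
      rw [hlenB] at hle2 ⊢
      simp only [List.length_cons]
      push_cast at hle2 ⊢
      omega

-- With k ≥ #remaining rounds A can never exhaust its invincibility, so it never breaks.
theorem aGo_total (n : Int) :
    ∀ (rest : List Int) (kA rounds total : Int) (heap : List Int),
      (rest.length : Int) ≤ kA →
      aGo n kA rounds total heap rest = rounds + rest.length := by
  intro rest
  induction rest with
  | nil => intro kA rounds total heap _; simp [aGo]
  | cons e rest ih =>
    intro kA rounds total heap hlen
    simp only [List.length_cons] at hlen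
    push_cast at hlen
    rw [aGo_cons]
    by_cases hov : n < total + e
    · rw [if_pos hov, if_neg (by omega)]
      rcases hd : insAsc (-e) heap with _ | ⟨m, hs⟩
      · have := (insAsc_perm (-e) heap).length_eq
        rw [hd] at this
        simp at this
      show aGo n (kA - 1) (rounds + 1) (total + e + m) hs rest = _
      rw [ih (kA - 1) (rounds + 1) (total + e + m) hs (by omega)]
      simp only [List.length_cons]
      push_cast
      ring
    · rw [if_neg hov]
      rw [ih kA (rounds + 1) (total + e) (insAsc (-e) heap) (by omega)]
      simp only [List.length_cons]
      push_cast
      ring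

-- With k ≥ |heap| + #remaining rounds B's heap never overflows, so B never pops.
theorem bGoRef_total (n k0 : Int) :
    ∀ (rest : List Int) (i used : Int) (heap : List Int),
      (heap.length : Int) + (rest.length : Int) ≤ k0 →
      bGoRef n k0 i used heap rest = i + rest.length := by
  intro rest
  induction rest with
  | nil => intro i used heap _; simp [bGoRef]
  | cons e rest ih =>
    intro i used heap hlen
    simp only [List.length_cons] at hlen
    push_cast at hlen
    have hlenB := insAsc_length e heap
    rw [bGoRef_cons, if_neg (by rw [hlenB]; push_cast; omega)]
    rw [ih (i + 1) used (insAsc e heap) (by rw [hlenB]; push_cast; omega)]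
    simp only [List.length_cons]
    push_cast
    ring

-- sum of the positive enemy counts: if every round's count is ≤ 0 it is 0, and with
-- it at most n no round can ever overflow (proof helper only)
def posSum (l : List Int) : Int := (l.map (fun x => max x 0)).sum

theorem posSum_eq_zero {l : List Int} (h : ∀ e ∈ l, e ≤ 0) : posSum l = 0 := by
  induction l with
  | nil => simp [posSum]
  | cons x xs ih =>
    have h1 := h x (by simp)
    have h2 := ih (fun y hy => h y (by simp [hy]))
    simp only [posSum, List.map_cons, List.sum_cons] at h2 ⊢
    omega

theorem posSum_nonneg (l : List Int) : 0 ≤ posSum l := by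
  apply sum_nonneg'
  intro x hx
  obtain ⟨y, _, rfl⟩ := List.mem_map.mp hx
  omega

theorem posSum_cons (e : Int) (l : List Int) : posSum (e :: l) = max e 0 + posSum l := by
  simp [posSum]

-- With n at least the positive total, A never overflows and returns every round.
theorem aGo_calm (n : Int) :
    ∀ (rest : List Int) (kA rounds total : Int) (heap : List Int),
      total + posSum rest ≤ n →
      aGo n kA rounds total heap rest = rounds + rest.length := by
  intro rest
  induction rest with
  | nil => intro kA rounds total heap _; simp [aGo]
  | cons e rest ih =>
    intro kA rounds total heap hcalm
    rw [posSum_cons] at hcalm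
    have h1 := posSum_nonneg rest
    rw [aGo_cons, if_neg (by omega)]
    rw [ih kA (rounds + 1) (total + e) (insAsc (-e) heap) (by omega)]
    simp only [List.length_cons]
    push_cast
    ring

-- Likewise B's spend can never exceed the positive total, so B never returns early.
theorem bGoRef_calm (n k0 : Int) :
    ∀ (rest : List Int) (i used : Int) (heap : List Int),
      used + posSum heap + posSum rest ≤ n →
      bGoRef n k0 i used heap rest = i + rest.length := by
  intro rest
  induction rest with
  | nil => intro i used heap _; simp [bGoRef]
  | cons e rest ih =>
    intro i used heap hcalm
    rw [posSum_cons] at hcalm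
    have h1 := posSum_nonneg rest
    have h2 := posSum_nonneg heap
    rw [bGoRef_cons]
    by_cases hfull : k0 < ((insAsc e heap).length : Int)
    · rw [if_pos hfull]
      rcases hd : insAsc e heap with _ | ⟨m, hs⟩
      · have := (insAsc_perm e heap).length_eq
        rw [hd] at this
        simp at this
      have hperm := insAsc_perm e heap
      rw [hd] at hperm
      have hps : max m 0 + posSum hs = max e 0 + posSum heap := by
        have h3 := (hperm.map (fun x => max x 0)).sum_eq
        simpa [posSum] using h3
      have h4 := posSum_nonneg hs
      show (if n < used + m then i else _) = _
      rw [if_neg (by omega)]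
      rw [ih (i + 1) (used + m) hs (by omega)]
      simp only [List.length_cons]
      push_cast
      ring
    · rw [if_neg hfull]
      have hps : posSum (insAsc e heap) = max e 0 + posSum heap := by
        have h3 := ((insAsc_perm e heap).map (fun x => max x 0)).sum_eq
        simpa [posSum] using h3
      rw [ih (i + 1) used (insAsc e heap) (by omega)]
      simp only [List.length_cons]
      push_cast
      ring

-- ===== VERDICT (by name: the statement is the Claim_ definition above) =====
theorem solution_spec : Claim_equal_solution := by
  unfold Claim_equal_solution
  intro n k enemy _ hpre
  unfold Spec_solution solution solution_alt
  rw [bGo_eq_ref n k enemy 0 0 [] [] (List.Perm.refl _) (by simp)]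
  rcases hpre with ⟨hk, hnn⟩ | hlen | hcalm
  case inr.inl =>
    rw [aGo_total n enemy k 0 0 [] hlen, bGoRef_total n k enemy 0 0 [] (by simp; omega)]
  case inr.inr =>
    have hps0 : posSum ([] : List Int) = 0 := by simp [posSum]
    have hpse : posSum enemy = 0 := posSum_eq_zero hcalm.2
    have hn0 : 0 ≤ n := hcalm.1
    rw [aGo_calm n enemy k 0 0 [] (by omega), bGoRef_calm n k enemy 0 0 [] (by omega)]
  by_cases hn : 0 ≤ n
  · have h0 := main n k enemy hnn k 0 0 0 [] []
      ⟨[], [], [], by simp, by simp, by simp, by simp, by simp, by simp, by simp,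
       by simp, hn, by simp, by simp, by omega, Or.inl rfl, by simp; omega⟩
    simpa [negMap] using h0
  · have hA := aGo_neg n (by omega) enemy hnn k 0 [] hk (by simp)
    have hB := bGoRef_neg n k (by omega) enemy hnn 0 0 [] le_rfl (by simp) (by simp; omega)
    simp only [List.sum_nil, List.length_nil] at hA hB
    simp only [negMap, List.map_nil] at hA
    rw [hA, hB]
    omega
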